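-- pv_equiv track=rewrite | github.com/kdw8219/LiveCommerce_management | apps/commerce_management/app/service/chat/chat.py | _find_user_group
-- ===== SOURCE A (Python) =====
-- from typing import Any
--
-- def _normalize_user_key(value: Any) -> str:
--     return str(value or "").strip().lower()
--
-- def _find_user_group(rows: list[list[Any]], user_id: str) -> tuple[int, int] | None:
--     """
--     Find the last contiguous block (group) of rows where column B matches the user_id.
--     Returns (start_index, end_index) inclusive, or None if not found.
--     """
--     target = _normalize_user_key(user_id)
--     if not target:
--         return None
--
--     matches: list[int] = []
--     for idx, row in enumerate(rows):
--         col_b = row[1] if len(row) > 1 else ""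
--         if _normalize_user_key(col_b) == target:
--             matches.append(idx)
--
--     if not matches:
--         return None
--
--     pivot = matches[-1]
--
--     start = pivot
--     while start - 1 >= 0:
--         prev_row = rows[start - 1]
--         prev_b = prev_row[1] if len(prev_row) > 1 else ""
--         if _normalize_user_key(prev_b) != target:
--             break
--         start -= 1
--
--     end = pivot
--     last_index = len(rows) - 1
--     while end + 1 <= last_index:
--         next_row = rows[end + 1]
--         next_b = next_row[1] if len(next_row) > 1 else ""
--         if _normalize_user_key(next_b) != target:
--             break
--         end += 1
--
--     return (start, end)
-- ===== SOURCE B (Python) =====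
-- from typing import Any
--
-- def _normalize_user_key(value: Any) -> str:
--     return str(value or "").strip().lower()
--
-- def _find_user_group(rows: list[list[Any]], user_id: str):
--     target = _normalize_user_key(user_id)
--     if not target:
--         return None
--     end = None
--     for i in range(len(rows) - 1, -1, -1):
--         row = rows[i]
--         if _normalize_user_key(row[1] if len(row) > 1 else "") == target:
--             end = i
--             break
--     if end is None:
--         return None
--     start = end
--     while start > 0:
--         row = rows[start - 1]
--         if _normalize_user_key(row[1] if len(row) > 1 else "") != target:
--             break
--         start -= 1
--     return (start, end)
-- ===== Notes on version B (the rewrite author's own statement) =====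
-- stated objective: simpler
-- what changed: B drops A's full forward pass that builds a matches list and A's redundant forward-expansion loop: it scans once from the end for the first matching row (the block's end) and then decrements while rows still match to find the start.
import Mathlib
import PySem

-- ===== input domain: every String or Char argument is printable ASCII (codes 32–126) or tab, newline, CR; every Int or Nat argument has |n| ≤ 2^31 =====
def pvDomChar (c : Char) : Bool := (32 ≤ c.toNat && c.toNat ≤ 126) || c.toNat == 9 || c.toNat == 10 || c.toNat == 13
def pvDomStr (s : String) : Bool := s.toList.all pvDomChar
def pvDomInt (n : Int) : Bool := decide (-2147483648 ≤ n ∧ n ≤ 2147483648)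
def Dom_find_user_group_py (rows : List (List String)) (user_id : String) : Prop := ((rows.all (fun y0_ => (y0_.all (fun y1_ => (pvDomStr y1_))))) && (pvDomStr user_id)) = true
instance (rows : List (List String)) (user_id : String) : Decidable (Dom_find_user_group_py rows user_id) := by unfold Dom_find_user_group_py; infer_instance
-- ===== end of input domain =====

-- B replaces A's full matches-list pass plus redundant forward-expansion loop by a single
-- backward scan for the block's end followed by the same leftward extension (simpler, one pass).

-- shared helper: _normalize_user_key(value) = str(value or "").strip().lower()
-- (for a string argument, `str(value or "")` is the string itself when nonempty and "" otherwise,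
--  and strip/lower of "" is "", so it equals value.strip().lower() exactly)
def pvNorm (s : String) : String := PySem.Str.lower (PySem.Str.strip s)

-- shared helper expression: `row[1] if len(row) > 1 else ""` (the index is in range under the guard)
def pvColB (row : List String) : String := if row.length > 1 then row.getD 1 "" else ""

-- ===== PORT A =====
-- `while start - 1 >= 0: … start -= 1` (start stays a valid nonnegative index; rows[start-1] is in range)
def find_user_group_py_start (rows : List (List String)) (target : String) : Nat → Nat
  | 0 => 0
  | s + 1 => if pvNorm (pvColB (rows.getD s [])) ≠ target then s + 1
             else find_user_group_py_start rows target s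

-- `while end + 1 <= last_index: … end += 1` (rows[end+1] is in range under the guard)
def find_user_group_py_end (rows : List (List String)) (target : String) (e : Nat) : Nat :=
  if e + 1 ≤ rows.length - 1 then
    if pvNorm (pvColB (rows.getD (e + 1) [])) ≠ target then e
    else find_user_group_py_end rows target (e + 1)
  else e
termination_by rows.length - e
decreasing_by omega

def find_user_group_py (rows : List (List String)) (user_id : String) : Option (Int × Int) :=
  let target := pvNorm user_id
  if target = "" then none
  else
    let matches_ := (PySem.List.enumerate rows 0).foldl
      (fun acc p => if pvNorm (pvColB p.2) = target then acc ++ [p.1] else acc) ([] : List Int)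
    match matches_.getLast? with   -- `if not matches: return None; pivot = matches[-1]`
    | none => none
    | some pivot =>
      -- pivot is an index produced by enumerate, hence ≥ 0: .toNat is exact
      some ((find_user_group_py_start rows target pivot.toNat : Int),
            (find_user_group_py_end rows target pivot.toNat : Int))

-- ===== PORT B =====
-- `for i in range(len(rows)-1, -1, -1): … break` : countdown scan for the last matching index
def find_user_group_py_alt_find (rows : List (List String)) (target : String) : Nat → Option Nat
  | 0 => none
  | i + 1 => if pvNorm (pvColB (rows.getD i [])) = target then some i
             else find_user_group_py_alt_find rows target i

-- `while start > 0: … start -= 1`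
def find_user_group_py_alt_start (rows : List (List String)) (target : String) : Nat → Nat
  | 0 => 0
  | s + 1 => if pvNorm (pvColB (rows.getD s [])) ≠ target then s + 1
             else find_user_group_py_alt_start rows target s

def find_user_group_py_alt (rows : List (List String)) (user_id : String) : Option (Int × Int) :=
  let target := pvNorm user_id
  if target = "" then none
  else
    match find_user_group_py_alt_find rows target rows.length with
    | none => none
    | some e => some ((find_user_group_py_alt_start rows target e : Int), (e : Int))

-- ===== PRECONDITION & SPEC =====
def Spec_find_user_group_py (rows : List (List String)) (user_id : String) (out : Option (Int × Int)) : Prop := out = find_user_group_py_alt rows user_id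
instance (rows : List (List String)) (user_id : String) (out : Option (Int × Int)) : Decidable (Spec_find_user_group_py rows user_id out) := by unfold Spec_find_user_group_py; infer_instance

-- ===== CLAIM (what is proved, stated in full; the proofs are below) =====
def Claim_equal_find_user_group_py : Prop := ∀ (rows : List (List String)) (user_id : String), Dom_find_user_group_py rows user_id → Spec_find_user_group_py rows user_id (find_user_group_py rows user_id)

-- ===== LEMMAS AND PROOFS =====

-- the two start loops are the same recursion
lemma start_eq (rows : List (List String)) (target : String) (s : Nat) :
    find_user_group_py_start rows target s = find_user_group_py_alt_start rows target s := by
  induction s with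
  | zero => rfl
  | succ n ih =>
    rw [find_user_group_py_start, find_user_group_py_alt_start, ih]

-- the backward scan returns the greatest matching index below n
lemma alt_find_spec (rows : List (List String)) (target : String) (n : Nat) :
    (∀ e, find_user_group_py_alt_find rows target n = some e →
      e < n ∧ pvNorm (pvColB (rows.getD e [])) = target ∧
      ∀ j, e < j → j < n → pvNorm (pvColB (rows.getD j [])) ≠ target) := by
  induction n with
  | zero => intro e h; simp [find_user_group_py_alt_find] at h
  | succ m ih =>
    intro e h
    rw [find_user_group_py_alt_find] at h
    split_ifs at h with hm
    · cases h
      exact ⟨by omega, hm, by intro j h1 h2; omega⟩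
    · obtain ⟨h1, h2, h3⟩ := ih e h
      refine ⟨by omega, h2, ?_⟩
      intro j hj1 hj2
      rcases Nat.lt_succ_iff_lt_or_eq.mp hj2 with h' | h'
      · exact h3 j hj1 h'
      · subst h'; exact hm

-- A's matches-list tail equals B's backward scan result
lemma matches_getLast (rows : List (List String)) (target : String) (n : Nat) :
    ((PySem.List.pyRange 0 (n : Int) 1).foldl
        (fun acc j => if pvNorm (pvColB (PySem.List.pyGetD rows j [])) = target
                      then acc ++ [j] else acc) ([] : List Int)).getLast?
      = (find_user_group_py_alt_find rows target n).map (fun k => (k : Int)) := by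
  induction n with
  | zero =>
    rw [PySem.List.pyRange_one_eq_nil (by omega)]
    rfl
  | succ m ih =>
    have hcast : ((m + 1 : Nat) : Int) = (m : Int) + 1 := by push_cast; ring
    rw [hcast, PySem.List.pyRange_one_succ_right (by positivity), List.foldl_append]
    simp only [List.foldl_cons, List.foldl_nil, PySem.List.pyGetD_natCast]
    rw [find_user_group_py_alt_find]
    split_ifs with hm
    · simp
    · simpa using ih

-- A's forward-expansion loop never moves: the pivot is already the last match
lemma end_fixed (rows : List (List String)) (target : String) (e : Nat)
    (hmax : ∀ j, e < j → j < rows.length → pvNorm (pvColB (rows.getD j [])) ≠ target) :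
    find_user_group_py_end rows target e = e := by
  rw [find_user_group_py_end]
  split_ifs with h1 h2
  · rfl
  · exact absurd (not_not.mp h2) (hmax (e + 1) (by omega) (by omega))
  · rfl

-- ===== VERDICT (by name: the statement is the Claim_ definition above) =====
theorem find_user_group_py_spec : Claim_equal_find_user_group_py := by
  intro rows user_id _dom
  unfold Spec_find_user_group_py find_user_group_py find_user_group_py_alt
  by_cases ht : pvNorm user_id = ""
  · simp [ht]
  · simp only [if_neg ht]
    have hen : PySem.List.enumerate rows 0
        = (PySem.List.pyRange 0 (PySem.List.len rows) 1).map
            (fun j => (j, PySem.List.pyGetD rows j [])) :=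
      PySem.List.enumerate_eq_map_pyRange rows []
    rw [hen, List.foldl_map]
    have hlen : PySem.List.len rows = ((rows.length : Nat) : Int) := by
      simp [PySem.List.len]
    rw [hlen, matches_getLast rows (pvNorm user_id) rows.length]
    cases hf : find_user_group_py_alt_find rows (pvNorm user_id) rows.length with
    | none => simp
    | some e =>
      obtain ⟨he1, he2, he3⟩ := alt_find_spec rows (pvNorm user_id) rows.length e hf
      show (match some ((e:Int)) with
        | none => (none : Option (Int × Int))
        | some pivot => some ((find_user_group_py_start rows (pvNorm user_id) pivot.toNat : Int),
            (find_user_group_py_end rows (pvNorm user_id) pivot.toNat : Int))) = _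
      show some (_, _) = _
      rw [Int.toNat_natCast, start_eq, end_fixed rows (pvNorm user_id) e he3]
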